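-- pv_equiv track=rewrite | github.com/qs-1/CCC-solutions | Junior/2017/j4.py | count_valid_minutes
-- ===== SOURCE A (Python) =====
-- def count_valid_minutes(curr_hour, max_minute=60):
--     count = 0
--     for j in range(1, 60 if max_minute == 60 else max_minute+1): # could be less than 60 for the final hour, like for 1hr 20 min, we count hr normally, but for 2nd hour we stop at 20
--         ignore = False
--         if curr_hour < 10:  # ignore starting 0 in the time like 1:00
--             diff = abs(curr_hour % 10 - j // 10)
--             ignore = True
--         else:
--             diff = abs(curr_hour % 10 - curr_hour // 10)
--         diff *= -1 if j // 10 > j % 10 else 1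
--
--         if (curr_hour % 10) + diff == (j // 10) and (j // 10) + diff == j % 10:
--             if not ignore:
--                 if curr_hour % 10 == (curr_hour // 10) + diff:
--                     count += 1
--             else:
--                 count += 1
--     return count
-- ===== SOURCE B (Python) =====
-- def count_valid_minutes(curr_hour, max_minute=60):
--     # Directly construct the arithmetic-progression candidate minutes instead of scanning all minutes.
--     upper = 59 if max_minute == 60 else max_minute
--     h1 = curr_hour % 10
--     count = 0
--     if curr_hour < 10:
--         for t in range(10):
--             o = 2 * t - h1
--             if 0 <= o <= 9:
--                 j = 10 * t + o
--                 if 1 <= j <= upper: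
--                     count += 1
--     else:
--         H = curr_hour // 10
--         t = 2 * h1 - H
--         o = 3 * h1 - 2 * H
--         if t >= 0 and 0 <= o <= 9:
--             j = 10 * t + o
--             if 1 <= j <= upper:
--                 count = 1
--     return count
-- ===== Notes on version B (the rewrite author's own statement) =====
-- stated objective: faster
-- what changed: Instead of scanning every minute j in [1, upper] and testing A's digit-difference condition, B decodes the hour's digits and directly constructs the arithmetic-progression candidate minutes (a single candidate for hour >= 10; one candidate per tens digit t in 0..9 for hour < 10) and counts those whose digits are valid and which lie in [1, upper].
import Mathlib
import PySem

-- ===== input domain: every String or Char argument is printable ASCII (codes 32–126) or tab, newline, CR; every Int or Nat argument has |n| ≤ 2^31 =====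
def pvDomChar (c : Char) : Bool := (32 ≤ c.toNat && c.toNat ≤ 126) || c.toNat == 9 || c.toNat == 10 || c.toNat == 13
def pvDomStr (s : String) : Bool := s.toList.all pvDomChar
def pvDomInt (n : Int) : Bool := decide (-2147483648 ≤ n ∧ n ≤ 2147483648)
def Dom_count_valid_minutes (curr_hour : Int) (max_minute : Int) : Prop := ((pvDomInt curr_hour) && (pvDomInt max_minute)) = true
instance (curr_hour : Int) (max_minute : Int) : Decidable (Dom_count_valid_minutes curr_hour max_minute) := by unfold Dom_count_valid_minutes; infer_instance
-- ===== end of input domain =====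

-- B replaces A's scan over every minute with direct construction of the arithmetic-progression
-- candidate minutes (objective: faster — O(1) candidates instead of a loop over max_minute minutes).

-- ===== PORT A =====
def count_valid_minutes (curr_hour : Int) (max_minute : Int) : Int :=
  (PySem.List.pyRange 1 (if max_minute == 60 then 60 else max_minute + 1) 1).foldl
    (fun count j =>
      -- (diff, ignore) set in the two branches of `if curr_hour < 10`
      let pr : Int × Bool :=
        if curr_hour < 10 then
          (|PySem.Int.mod curr_hour 10 - PySem.Int.floordiv j 10|, true)
        else
          (|PySem.Int.mod curr_hour 10 - PySem.Int.floordiv curr_hour 10|, false)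
      let diff := pr.1 * (if PySem.Int.floordiv j 10 > PySem.Int.mod j 10 then (-1 : Int) else 1)
      if PySem.Int.mod curr_hour 10 + diff = PySem.Int.floordiv j 10 ∧
         PySem.Int.floordiv j 10 + diff = PySem.Int.mod j 10 then
        if pr.2 = false then
          (if PySem.Int.mod curr_hour 10 = PySem.Int.floordiv curr_hour 10 + diff then count + 1
           else count)
        else count + 1
      else count) 0

-- ===== PORT B =====
def count_valid_minutes_alt (curr_hour : Int) (max_minute : Int) : Int :=
  let upper : Int := if max_minute == 60 then 59 else max_minute
  let h1 := PySem.Int.mod curr_hour 10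
  if curr_hour < 10 then
    (PySem.List.pyRange 0 10 1).foldl
      (fun count t =>
        let o := 2 * t - h1
        if 0 ≤ o ∧ o ≤ 9 then
          let j := 10 * t + o
          if 1 ≤ j ∧ j ≤ upper then count + 1 else count
        else count) 0
  else
    let H := PySem.Int.floordiv curr_hour 10
    let t := 2 * h1 - H
    let o := 3 * h1 - 2 * H
    if 0 ≤ t ∧ (0 ≤ o ∧ o ≤ 9) then
      let j := 10 * t + o
      if 1 ≤ j ∧ j ≤ upper then 1 else 0
    else 0

-- ===== PRECONDITION & SPEC =====
def Spec_count_valid_minutes (curr_hour : Int) (max_minute : Int) (out : Int) : Prop := out = count_valid_minutes_alt curr_hour max_minute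
instance (curr_hour : Int) (max_minute : Int) (out : Int) : Decidable (Spec_count_valid_minutes curr_hour max_minute out) := by unfold Spec_count_valid_minutes; infer_instance

-- ===== CLAIM (what is proved, stated in full; the proofs are below) =====
def Claim_equal_count_valid_minutes : Prop := ∀ (curr_hour : Int) (max_minute : Int), Dom_count_valid_minutes curr_hour max_minute → Spec_count_valid_minutes curr_hour max_minute (count_valid_minutes curr_hour max_minute)

-- ===== LEMMAS AND PROOFS =====

-- The condition under which A's loop body increments the counter, as a Prop on (curr_hour, j).
abbrev CondA (h j : Int) : Prop :=
  let h1 := PySem.Int.mod h 10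
  let t := PySem.Int.floordiv j 10
  let o := PySem.Int.mod j 10
  let d0 : Int := if h < 10 then |h1 - t| else |h1 - PySem.Int.floordiv h 10|
  let d := d0 * (if t > o then (-1 : Int) else 1)
  (h1 + d = t ∧ t + d = o) ∧ (h < 10 ∨ h1 = PySem.Int.floordiv h 10 + d)

-- floordiv/mod of a number written as 10*t + o with a digit o.
lemma fdmd_eq (t o : Int) (h0 : 0 ≤ o) (h9 : o ≤ 9) :
    PySem.Int.floordiv (10 * t + o) 10 = t ∧ PySem.Int.mod (10 * t + o) 10 = o := by
  have hfd : PySem.Int.floordiv (10 * t + o) 10 = t := by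
    rw [PySem.Int.floordiv_eq_iff_of_pos (by norm_num)]
    constructor <;> nlinarith
  refine ⟨hfd, ?_⟩
  have := PySem.Int.floordiv_mul_add_mod (10 * t + o) 10
  rw [hfd] at this; omega

-- A's loop equals counting CondA over the range.
lemma portA_eq_countP (h m : Int) :
    count_valid_minutes h m =
      ((PySem.List.pyRange 1 (if m == 60 then 60 else m + 1) 1).countP
        (fun j => decide (CondA h j)) : Int) := by
  unfold count_valid_minutes
  have hbody : ∀ (c j : Int),
      (let pr : Int × Bool :=
        if h < 10 then
          (|PySem.Int.mod h 10 - PySem.Int.floordiv j 10|, true)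
        else
          (|PySem.Int.mod h 10 - PySem.Int.floordiv h 10|, false)
       let diff := pr.1 * (if PySem.Int.floordiv j 10 > PySem.Int.mod j 10 then (-1 : Int) else 1)
       if PySem.Int.mod h 10 + diff = PySem.Int.floordiv j 10 ∧
          PySem.Int.floordiv j 10 + diff = PySem.Int.mod j 10 then
         if pr.2 = false then
           (if PySem.Int.mod h 10 = PySem.Int.floordiv h 10 + diff then c + 1 else c)
         else c + 1
       else c) = if CondA h j then c + 1 else c := by
    intro c j
    by_cases hh : h < 10 <;> simp only [hh, if_true, if_false, CondA] <;> split_ifs <;>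
      first | rfl | tauto
  simp only [hbody]
  rw [PySem.List.foldl_ite_add_one (fun j => CondA h j)]
  omega

-- Characterisation of CondA when curr_hour < 10 and 1 ≤ j.
lemma condA_lt10 (h j : Int) (hh : h < 10) :
    CondA h j ↔ PySem.Int.mod j 10 = 2 * PySem.Int.floordiv j 10 - PySem.Int.mod h 10 := by
  have hmo0 : 0 ≤ PySem.Int.mod j 10 := PySem.Int.mod_nonneg _ (by norm_num)
  have hmo9 : PySem.Int.mod j 10 < 10 := PySem.Int.mod_lt _ (by norm_num)
  have hj10 := PySem.Int.floordiv_mul_add_mod j 10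
  have hh0 : 0 ≤ PySem.Int.mod h 10 := PySem.Int.mod_nonneg _ (by norm_num)
  have hh9 : PySem.Int.mod h 10 < 10 := PySem.Int.mod_lt _ (by norm_num)
  simp only [CondA, hh, if_true, true_or, and_true]
  rcases abs_cases (PySem.Int.mod h 10 - PySem.Int.floordiv j 10) with ⟨he, _⟩ | ⟨he, _⟩ <;>
    rw [he] <;> split_ifs <;> constructor <;> intro hc <;> omega

-- Characterisation of CondA when 10 ≤ curr_hour and 1 ≤ j.
lemma condA_ge10 (h j : Int) (hh : ¬ h < 10) :
    CondA h j ↔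
      PySem.Int.floordiv j 10 = 2 * PySem.Int.mod h 10 - PySem.Int.floordiv h 10 ∧
      PySem.Int.mod j 10 = 3 * PySem.Int.mod h 10 - 2 * PySem.Int.floordiv h 10 := by
  simp only [CondA, hh, if_false, false_or]
  rcases abs_cases (PySem.Int.mod h 10 - PySem.Int.floordiv h 10) with ⟨he, _⟩ | ⟨he, _⟩ <;>
    rw [he] <;> split_ifs <;> constructor <;> intro hc <;> omega

-- Counting a single candidate value in the range [1, u].
lemma countP_eq_single (u a : Int) :
    ((PySem.List.pyRange 1 (u + 1) 1).countP (fun j => decide (j = a)))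
      = if 1 ≤ a ∧ a ≤ u then 1 else 0 := by
  have hc : (fun j : Int => decide (j = a)) = (fun j : Int => j == a) := by
    funext j; by_cases hja : j = a <;> simp [hja]
  rw [hc, ← List.count_eq_countP]
  by_cases hmem : a ∈ PySem.List.pyRange 1 (u + 1) 1
  · have hb := (PySem.List.mem_pyRange_one).1 hmem
    rw [List.count_eq_one_of_mem (PySem.List.nodup_pyRange_one _ _) hmem]
    rw [if_pos (by omega)]
  · rw [List.count_eq_zero.mpr hmem]
    have := (PySem.List.mem_pyRange_one (x := a) (a := 1) (b := u + 1))
    rw [if_neg (by intro hab; exact hmem (this.2 (by omega)))]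

-- The hour<10 case: counting minutes j with j%10 = 2*(j//10) - h1 over [1,u]
-- equals counting tens digits t over [0,10) whose candidate minute lies in [1,u].
lemma count_lt10 (u h1 : Int) (h10 : 0 ≤ h1) (h19 : h1 ≤ 9) :
    ((PySem.List.pyRange 1 (u + 1) 1).countP
        (fun j => decide (PySem.Int.mod j 10 = 2 * PySem.Int.floordiv j 10 - h1)))
      = ((PySem.List.pyRange 0 10 1).countP
        (fun t => decide ((0 ≤ 2 * t - h1 ∧ 2 * t - h1 ≤ 9) ∧
                          (1 ≤ 10 * t + (2 * t - h1) ∧ 10 * t + (2 * t - h1) ≤ u)))) := by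
  rw [List.countP_eq_length_filter, List.countP_eq_length_filter]
  have hinj : Function.Injective (fun t : Int => 10 * t + (2 * t - h1)) := by
    intro a b hab; simp only at hab; omega
  rw [show ((PySem.List.pyRange 0 10 1).filter
        (fun t => decide ((0 ≤ 2 * t - h1 ∧ 2 * t - h1 ≤ 9) ∧
                          (1 ≤ 10 * t + (2 * t - h1) ∧ 10 * t + (2 * t - h1) ≤ u)))).length
      = (((PySem.List.pyRange 0 10 1).filter
        (fun t => decide ((0 ≤ 2 * t - h1 ∧ 2 * t - h1 ≤ 9) ∧
                          (1 ≤ 10 * t + (2 * t - h1) ∧ 10 * t + (2 * t - h1) ≤ u)))).map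
            (fun t : Int => 10 * t + (2 * t - h1))).length from
        (List.length_map (fun t : Int => 10 * t + (2 * t - h1))).symm]
  apply List.Perm.length_eq
  apply (List.perm_ext_iff_of_nodup
    ((PySem.List.nodup_pyRange_one _ _).filter _)
    (((PySem.List.nodup_pyRange_one _ _).filter _).map hinj)).2
  intro x
  simp only [List.mem_filter, List.mem_map, PySem.List.mem_pyRange_one, decide_eq_true_eq]
  constructor
  · rintro ⟨⟨hx1, hx2⟩, hP⟩
    refine ⟨PySem.Int.floordiv x 10, ⟨⟨?_, ?_⟩, ⟨?_, ?_⟩⟩, ?_⟩ <;>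
      [skip; skip; skip; skip; skip] <;>
      have hmo0 : 0 ≤ PySem.Int.mod x 10 := PySem.Int.mod_nonneg _ (by norm_num) <;>
      have hmo9 : PySem.Int.mod x 10 < 10 := PySem.Int.mod_lt _ (by norm_num) <;>
      have hx10 := PySem.Int.floordiv_mul_add_mod x 10 <;> omega
  · rintro ⟨t, ⟨⟨ht0, ht10⟩, ⟨ho0, ho9⟩, hj1, hju⟩, hx⟩
    obtain ⟨hfd, hmd⟩ := fdmd_eq t (2 * t - h1) ho0 ho9
    subst hx
    exact ⟨⟨by omega, by omega⟩, by omega⟩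

-- A = B pointwise.
lemma portA_eq_portB (h m : Int) : count_valid_minutes h m = count_valid_minutes_alt h m := by
  have hstop : (if m == 60 then (60 : Int) else m + 1) = (if m == 60 then (59 : Int) else m) + 1 := by
    by_cases hm : m = 60 <;> simp [hm]
  set u : Int := if m == 60 then (59 : Int) else m with hu
  have hh0 : 0 ≤ PySem.Int.mod h 10 := PySem.Int.mod_nonneg _ (by norm_num)
  have hh9 : PySem.Int.mod h 10 < 10 := PySem.Int.mod_lt _ (by norm_num)
  rw [portA_eq_countP, hstop]
  by_cases hh : h < 10
  · -- hour < 10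
    have hcong : ((PySem.List.pyRange 1 (u + 1) 1).countP (fun j => decide (CondA h j)))
        = ((PySem.List.pyRange 1 (u + 1) 1).countP
            (fun j => decide (PySem.Int.mod j 10 = 2 * PySem.Int.floordiv j 10 - PySem.Int.mod h 10))) := by
      apply List.countP_congr
      intro j hj'
      have hjb := (PySem.List.mem_pyRange_one).1 hj'
      simp only [decide_eq_true_eq]
      exact condA_lt10 h j hh
    rw [hcong, count_lt10 u (PySem.Int.mod h 10) hh0 (by omega)]
    unfold count_valid_minutes_alt
    simp only [← hu, hh, if_true]
    have hbody2 : ∀ (c t : Int),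
        (if 0 ≤ 2 * t - PySem.Int.mod h 10 ∧ 2 * t - PySem.Int.mod h 10 ≤ 9 then
           if 1 ≤ 10 * t + (2 * t - PySem.Int.mod h 10) ∧
              10 * t + (2 * t - PySem.Int.mod h 10) ≤ u then c + 1 else c
         else c)
        = if (0 ≤ 2 * t - PySem.Int.mod h 10 ∧ 2 * t - PySem.Int.mod h 10 ≤ 9) ∧
             (1 ≤ 10 * t + (2 * t - PySem.Int.mod h 10) ∧
              10 * t + (2 * t - PySem.Int.mod h 10) ≤ u) then c + 1 else c := by
      intro c t; split_ifs <;> tauto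
    simp only [hbody2]
    rw [PySem.List.foldl_ite_add_one
      (fun t => (0 ≤ 2 * t - PySem.Int.mod h 10 ∧ 2 * t - PySem.Int.mod h 10 ≤ 9) ∧
                (1 ≤ 10 * t + (2 * t - PySem.Int.mod h 10) ∧
                 10 * t + (2 * t - PySem.Int.mod h 10) ≤ u))]
    omega
  · -- hour ≥ 10
    set h1 := PySem.Int.mod h 10 with hh1
    set H := PySem.Int.floordiv h 10 with hH
    have hcong : ((PySem.List.pyRange 1 (u + 1) 1).countP (fun j => decide (CondA h j)))
        = ((PySem.List.pyRange 1 (u + 1) 1).countP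
            (fun j => decide (j = 10 * (2 * h1 - H) + (3 * h1 - 2 * H)) &&
                      decide (0 ≤ 3 * h1 - 2 * H ∧ 3 * h1 - 2 * H ≤ 9))) := by
      apply List.countP_congr
      intro j hj'
      have hjb := (PySem.List.mem_pyRange_one).1 hj'
      have hmo0 : 0 ≤ PySem.Int.mod j 10 := PySem.Int.mod_nonneg _ (by norm_num)
      have hmo9 : PySem.Int.mod j 10 < 10 := PySem.Int.mod_lt _ (by norm_num)
      have hj10 := PySem.Int.floordiv_mul_add_mod j 10
      simp only [Bool.and_eq_true, decide_eq_true_eq]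
      rw [condA_ge10 h j hh]
      simp only [← hh1, ← hH]
      constructor
      · rintro ⟨ht, ho⟩; exact ⟨by omega, by omega⟩
      · rintro ⟨hjv, ho0, ho9⟩
        obtain ⟨hfd, hmd⟩ := fdmd_eq (2 * h1 - H) (3 * h1 - 2 * H) ho0 ho9
        rw [hjv]; exact ⟨hfd, hmd⟩
    rw [hcong]
    unfold count_valid_minutes_alt
    simp only [← hu, hh, if_false, ← hh1, ← hH]
    by_cases hov : 0 ≤ 3 * h1 - 2 * H ∧ 3 * h1 - 2 * H ≤ 9
    · have : (fun j : Int => decide (j = 10 * (2 * h1 - H) + (3 * h1 - 2 * H)) &&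
                      decide (0 ≤ 3 * h1 - 2 * H ∧ 3 * h1 - 2 * H ≤ 9))
          = (fun j : Int => decide (j = 10 * (2 * h1 - H) + (3 * h1 - 2 * H))) := by
        funext j; rw [decide_eq_true hov, Bool.and_true]
      rw [this, countP_eq_single]
      obtain ⟨ho0, ho9⟩ := hov
      split_ifs <;> omega
    · have : (fun j : Int => decide (j = 10 * (2 * h1 - H) + (3 * h1 - 2 * H)) &&
                      decide (0 ≤ 3 * h1 - 2 * H ∧ 3 * h1 - 2 * H ≤ 9))
          = (fun _ : Int => false) := by
        funext j; rw [decide_eq_false hov, Bool.and_false]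
      rw [this]
      simp only [List.countP_false, Function.const_apply, Nat.cast_zero]
      split_ifs <;> omega

-- ===== VERDICT (by name: the statement is the Claim_ definition above) =====
theorem count_valid_minutes_spec : Claim_equal_count_valid_minutes := by
  intro h m _
  unfold Spec_count_valid_minutes
  exact portA_eq_portB h m
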